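-- pv_equiv track=rewrite | github.com/Sieonn/Python | Lv.0/코드 처리하기.py | solution
-- ===== SOURCE A (Python) =====
-- def solution(code):
--     mode = True
--     ret = ""
--     for i , v in enumerate(code): #enumerate 하면 인덱스와 값이 주어진다.
--         if mode: #mode = 0
--             if v != "1" and i % 2 ==0:
--                 ret = ret + v
--             elif v == "1":
--                 mode = False
--         else:
--             if v != '1' and i % 2 == 1:
--                 ret = ret +v
--             elif v == '1':
--                 mode = True
--
--     if len(ret) == 0:
--         return 'empty'
--     return ret
-- ===== SOURCE B (Python) =====
-- def solution(code):
--     # The kept characters are exactly every other non-'1' character: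
--     # drop the '1' markers, then take positions 0, 2, 4, ... of what remains.
--     stripped = [v for v in code if v != '1']
--     kept = ''.join(stripped[::2])
--     return kept if kept else 'empty'
-- ===== Notes on version B (the rewrite author's own statement) =====
-- stated objective: simpler
-- what changed: Replaced the boolean mode/index-parity state machine by the closed-form observation that a character is kept iff an even number of non-'1' characters precede it, i.e. filter out the '1' markers and take every other remaining character with [::2].
import Mathlib
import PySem

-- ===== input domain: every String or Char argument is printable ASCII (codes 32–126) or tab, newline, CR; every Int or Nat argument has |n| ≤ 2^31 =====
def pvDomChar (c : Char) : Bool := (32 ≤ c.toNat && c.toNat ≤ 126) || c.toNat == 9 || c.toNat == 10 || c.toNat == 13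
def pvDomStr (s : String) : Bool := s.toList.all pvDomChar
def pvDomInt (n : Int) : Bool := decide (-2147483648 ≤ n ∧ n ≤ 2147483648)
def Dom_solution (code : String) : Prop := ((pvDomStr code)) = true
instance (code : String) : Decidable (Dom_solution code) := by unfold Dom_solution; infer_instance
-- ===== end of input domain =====

-- B replaces A's boolean-mode state machine by "drop the '1' markers, keep every other remaining char" (objective: simpler).

-- ===== PORT A =====
-- the for-loop over enumerate(code): state (i, mode, ret); ret is the growing string as a List Char
def aGo : Nat → Bool → List Char → List Char → List Char
  | _, _, ret, [] => ret
  | i, mode, ret, v :: rest =>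
    if mode then
      if v != '1' && i % 2 == 0 then aGo (i+1) mode (ret ++ [v]) rest
      else if v == '1' then aGo (i+1) false ret rest
      else aGo (i+1) mode ret rest
    else
      if v != '1' && i % 2 == 1 then aGo (i+1) mode (ret ++ [v]) rest
      else if v == '1' then aGo (i+1) true ret rest
      else aGo (i+1) mode ret rest

def solution (code : String) : String :=
  let ret := aGo 0 true [] code.toList
  if ret.length == 0 then "empty" else String.ofList ret

-- ===== PORT B =====
def solution_alt (code : String) : String :=
  let stripped := code.toList.filter (fun v => v != '1')
  -- stripped[::2]; the step 2 is nonzero so the slice never fails, hence getD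
  let kept := (PySem.List.slice? stripped none none 2).getD []
  if kept.isEmpty then "empty" else String.ofList kept

-- ===== PRECONDITION & SPEC =====
def Spec_solution (code : String) (out : String) : Prop := out = solution_alt code
instance (code : String) (out : String) : Decidable (Spec_solution code out) := by unfold Spec_solution; infer_instance

-- ===== CLAIM (what is proved, stated in full; the proofs are below) =====
def Claim_equal_solution : Prop := ∀ (code : String), Dom_solution code → Spec_solution code (solution code)

-- ===== LEMMAS AND PROOFS =====

-- every-other-element with a phase: pvPick true keeps the head, pvPick false drops it
def pvPick : Bool → List Char → List Char
  | _, [] => []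
  | true, a :: t => a :: pvPick false t
  | false, _ :: t => pvPick true t

lemma pvPick_fm (xs : List Char) :
    (List.filterMap (fun k => xs[2 * k]?) (List.range ((xs.length + 1) / 2)) = pvPick true xs)
    ∧ (List.filterMap (fun k => xs[2 * k + 1]?) (List.range (xs.length / 2)) = pvPick false xs) := by
  induction xs with
  | nil => simp [pvPick]
  | cons a t ih =>
    constructor
    · have hc : (t.length + 1 + 1) / 2 = t.length / 2 + 1 := by omega
      have hsh : ∀ k : Nat, (a :: t)[2 * (k + 1)]? = t[2 * k + 1]? := by
        intro k
        have h2 : 2 * (k + 1) = (2 * k + 1) + 1 := by ring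
        rw [h2, List.getElem?_cons_succ]
      simp only [List.length_cons, hc, List.range_succ_eq_map, List.filterMap_cons,
        List.filterMap_map, Nat.mul_zero, List.getElem?_cons_zero, Function.comp_def,
        hsh, ih.2, pvPick]
    · have hsh : ∀ k : Nat, (a :: t)[2 * k + 1]? = t[2 * k]? := by
        intro k; rw [List.getElem?_cons_succ]
      simp only [List.length_cons, hsh, ih.1, pvPick]

lemma slice2_eq (xs : List Char) :
    PySem.List.slice? xs none none 2 = some (pvPick true xs) := by
  simp only [PySem.List.slice?, PySem.List.sliceIndices]
  norm_num
  have hf : (fun x : Nat => xs[((2 : Int) * (x : Int)).toNat]?) = fun x : Nat => xs[2 * x]? := by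
    funext k
    have hk : ((2 : Int) * (k : Int)).toNat = 2 * k := by omega
    rw [hk]
  have hcount : (if 0 < xs.length then (((xs.length : Int) + 2 - 1) / 2).toNat else 0)
      = (xs.length + 1) / 2 := by
    split <;> omega
  rw [hf, hcount, (pvPick_fm xs).1]

lemma aGo_eq (l : List Char) : ∀ (i : Nat) (mode : Bool) (ret : List Char),
    aGo i mode ret l = ret ++ pvPick ((i % 2 == 0) == mode) (l.filter (fun v => v != '1')) := by
  induction l with
  | nil => intro i mode ret; simp [aGo, pvPick]
  | cons v rest ih =>
    intro i mode ret
    by_cases hv : v = '1' <;> by_cases hi : i % 2 = 0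
    · have h2 : (i + 1) % 2 = 1 := by omega
      cases mode <;> simp [aGo, hv, hi, h2, ih]
    · have h2 : (i + 1) % 2 = 0 := by omega
      have hi1 : i % 2 = 1 := by omega
      cases mode <;> simp [aGo, hv, hi1, h2, ih]
    · have h2 : (i + 1) % 2 = 1 := by omega
      cases mode <;> simp [aGo, hv, hi, h2, ih, pvPick]
    · have h2 : (i + 1) % 2 = 0 := by omega
      have hi1 : i % 2 = 1 := by omega
      cases mode <;> simp [aGo, hv, hi1, h2, ih, pvPick]

-- ===== VERDICT (by name: the statement is the Claim_ definition above) =====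
theorem solution_spec : Claim_equal_solution := by
  intro code _
  unfold Spec_solution solution solution_alt
  simp only [slice2_eq, aGo_eq, List.nil_append, Option.getD_some]
  simp [List.isEmpty_iff, List.length_eq_zero_iff]
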